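-- pv_equiv track=rewrite | github.com/Abhinavchitturi/AgriAi | timepass/UI/app.py | filter_chat_history
-- ===== SOURCE A (Python) =====
-- def filter_chat_history(history, search_query, filter_language, sort_order):
--     """Filter chat history based on criteria"""
--     filtered = history
--
--     # Filter by search query
--     if search_query:
--         filtered = [
--             chat for chat in filtered
--             if search_query.lower() in chat['query'].lower() or
--                search_query.lower() in chat['answer'].lower()
--         ]
--
--     # Filter by language
--     if filter_language != "All":
--         filtered = [
--             chat for chat in filtered
--             if chat.get('language', '') == filter_language
--         ]
--
--     # Sort results
--     if sort_order == "Recent First":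
--         filtered = sorted(filtered, key=lambda x: x.get('timestamp', ''), reverse=True)
--     elif sort_order == "Oldest First":
--         filtered = sorted(filtered, key=lambda x: x.get('timestamp', ''))
--
--     return filtered
-- ===== SOURCE B (Python) =====
-- def filter_chat_history(history, search_query, filter_language, sort_order):
--     """One pass with online insertion: each surviving chat is inserted directly
--     at its sorted position (stable insertion sort fused with the filtering)."""
--     sq = search_query.lower()
--     if sort_order == "Recent First":
--         before = lambda a, b: b < a
--     elif sort_order == "Oldest First":
--         before = lambda a, b: a < b
--     else:
--         before = None
--     result = []
--     for chat in history:
--         if search_query and sq not in chat['query'].lower() and sq not in chat['answer'].lower():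
--             continue
--         if filter_language != "All" and chat.get('language', '') != filter_language:
--             continue
--         if before is None:
--             result.append(chat)
--         else:
--             k = chat.get('timestamp', '')
--             i = 0
--             while i < len(result) and not before(k, result[i].get('timestamp', '')):
--                 i += 1
--             result.insert(i, chat)
--     return result
-- ===== Notes on version B (the rewrite author's own statement) =====
-- stated objective: alternative
-- what changed: Instead of staged filter passes followed by a library sort, B makes one pass over history, skipping non-matching chats and inserting each survivor directly at its sorted position (online stable insertion by timestamp, ascending or descending per sort_order, plain append otherwise); it trades the O(n log n) sort for an O(k^2) online insertion over the k survivors.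
import Mathlib
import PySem

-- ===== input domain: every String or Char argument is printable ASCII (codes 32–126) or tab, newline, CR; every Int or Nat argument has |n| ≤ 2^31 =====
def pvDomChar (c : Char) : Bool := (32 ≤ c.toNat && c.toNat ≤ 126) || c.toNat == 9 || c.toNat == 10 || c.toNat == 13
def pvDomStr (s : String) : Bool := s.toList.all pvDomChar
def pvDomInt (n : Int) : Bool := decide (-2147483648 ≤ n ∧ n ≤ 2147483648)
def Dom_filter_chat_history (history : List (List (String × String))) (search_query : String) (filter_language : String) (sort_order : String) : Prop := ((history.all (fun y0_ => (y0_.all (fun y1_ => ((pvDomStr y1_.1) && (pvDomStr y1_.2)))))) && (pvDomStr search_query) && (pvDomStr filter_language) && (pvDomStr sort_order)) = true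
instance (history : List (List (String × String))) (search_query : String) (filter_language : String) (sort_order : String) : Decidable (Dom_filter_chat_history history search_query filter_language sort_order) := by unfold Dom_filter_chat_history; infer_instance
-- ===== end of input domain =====

-- B replaces A's staged filter passes + library sort by one pass that skips non-matching chats
-- and inserts each survivor directly at its sorted position (online stable insertion); alternative algorithm, same results.


-- ===== PORT A =====
-- chat['query'] / chat['answer'] raise KeyError when absent; those inputs are excluded by
-- Pre_filter_chat_history, so the port may read them with getD "" (exact on Pre_).
def filter_chat_history (history : List (List (String × String))) (search_query : String) (filter_language : String) (sort_order : String) : List (List (String × String)) :=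
  let filtered := history
  let filtered := if search_query ≠ "" then
      filtered.filter (fun chat =>
        PySem.Str.isIn (PySem.Str.lower search_query)
          (PySem.Str.lower (PySem.Dict.getD (PySem.Dict.ofList chat) "query" "")) ||
        PySem.Str.isIn (PySem.Str.lower search_query)
          (PySem.Str.lower (PySem.Dict.getD (PySem.Dict.ofList chat) "answer" "")))
    else filtered
  let filtered := if filter_language ≠ "All" then
      filtered.filter (fun chat =>
        PySem.Dict.getD (PySem.Dict.ofList chat) "language" "" == filter_language)
    else filtered
  if sort_order = "Recent First" then
    PySem.List.sorted filtered (fun x => PySem.Dict.getD (PySem.Dict.ofList x) "timestamp" "") true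
  else if sort_order = "Oldest First" then
    PySem.List.sorted filtered (fun x => PySem.Dict.getD (PySem.Dict.ofList x) "timestamp" "") false
  else filtered

-- ===== PORT B =====
-- B's .insert(i, chat) with i found by scanning for the first slot where `before` holds is
-- exactly PySem.List.insertBy (insert before the first element satisfying `before`).
def filter_chat_history_alt (history : List (List (String × String))) (search_query : String) (filter_language : String) (sort_order : String) : List (List (String × String)) :=
  let sq := PySem.Str.lower search_query
  let ts := fun (x : List (String × String)) => PySem.Dict.getD (PySem.Dict.ofList x) "timestamp" ""
  let ins : List (List (String × String)) → List (String × String) → List (List (String × String)) :=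
    if sort_order = "Recent First" then
      fun result chat => PySem.List.insertBy (fun a b => decide (ts b < ts a)) chat result
    else if sort_order = "Oldest First" then
      fun result chat => PySem.List.insertBy (fun a b => decide (ts a < ts b)) chat result
    else
      fun result chat => result ++ [chat]
  history.foldl (fun result chat =>
    if search_query ≠ "" ∧
       ¬ PySem.Str.isIn sq (PySem.Str.lower (PySem.Dict.getD (PySem.Dict.ofList chat) "query" "")) ∧
       ¬ PySem.Str.isIn sq (PySem.Str.lower (PySem.Dict.getD (PySem.Dict.ofList chat) "answer" "")) then result
    else if filter_language ≠ "All" ∧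
       ¬ (PySem.Dict.getD (PySem.Dict.ofList chat) "language" "" == filter_language) then result
    else ins result chat) []

-- ===== PRECONDITION & SPEC =====
-- Pre_ excludes exactly the inputs where Python A raises KeyError: a non-empty search_query
-- together with some chat missing the 'query' key, or missing 'answer' when the query field
-- does not already contain the search string (short-circuit of A's 'or').
def Pre_filter_chat_history (history : List (List (String × String))) (search_query : String) (_filter_language : String) (_sort_order : String) : Prop :=
  search_query = "" ∨
    history.all (fun chat =>
      match (PySem.Dict.ofList chat).get? "query" with
      | none => false
      | some v =>
        PySem.Str.isIn (PySem.Str.lower search_query) (PySem.Str.lower v) ||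
        ((PySem.Dict.ofList chat).get? "answer").isSome) = true
instance (history : List (List (String × String))) (search_query : String) (filter_language : String) (sort_order : String) : Decidable (Pre_filter_chat_history history search_query filter_language sort_order) := by unfold Pre_filter_chat_history; infer_instance

def pvWitness_filter_chat_history : (List (List (String × String))) × String × String × String :=
  ([[("query", "Hi there"), ("answer", "yo"), ("language", "en"), ("timestamp", "2")],
    [("query", "bye"), ("answer", "ok"), ("language", "fr"), ("timestamp", "1")]],
   "hi", "All", "Recent First")

def Spec_filter_chat_history (history : List (List (String × String))) (search_query : String) (filter_language : String) (sort_order : String) (out : List (List (String × String))) : Prop := out = filter_chat_history_alt history search_query filter_language sort_order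
instance (history : List (List (String × String))) (search_query : String) (filter_language : String) (sort_order : String) (out : List (List (String × String))) : Decidable (Spec_filter_chat_history history search_query filter_language sort_order out) := by unfold Spec_filter_chat_history; infer_instance

-- ===== CLAIM =====
def Claim_equal_filter_chat_history : Prop := ∀ (history : List (List (String × String))) (search_query : String) (filter_language : String) (sort_order : String), Dom_filter_chat_history history search_query filter_language sort_order → Pre_filter_chat_history history search_query filter_language sort_order → Spec_filter_chat_history history search_query filter_language sort_order (filter_chat_history history search_query filter_language sort_order)

-- ===== LEMMAS AND PROOFS =====

-- a fold whose body skips the elements failing two guards equals the fold over the filtered list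
lemma foldl_skip2 {α β : Type} (c1 c2 : α → Prop) [DecidablePred c1] [DecidablePred c2]
    (f : β → α → β) (l : List α) (init : β) :
    l.foldl (fun acc x => if c1 x then acc else if c2 x then acc else f acc x) init
      = (l.filter (fun x => decide (¬ c1 x) && decide (¬ c2 x))).foldl f init := by
  induction l generalizing init with
  | nil => rfl
  | cons h t ih =>
    by_cases h1 : c1 h <;> by_cases h2 : c2 h <;> simp [h1, h2, ih]

-- appending each element one by one is the identity fold
lemma foldl_append_singleton {α : Type} (l : List α) (init : List α) :
    l.foldl (fun acc x => acc ++ [x]) init = init ++ l := by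
  induction l generalizing init with
  | nil => simp
  | cons h t ih => simp [ih]

-- A's two staged filter passes produce the same list as B's single combined filter
lemma staged_eq_combined (history : List (List (String × String)))
    (search_query filter_language : String) :
    (let f1 := if search_query ≠ "" then
        history.filter (fun chat =>
          PySem.Str.isIn (PySem.Str.lower search_query)
            (PySem.Str.lower (PySem.Dict.getD (PySem.Dict.ofList chat) "query" "")) ||
          PySem.Str.isIn (PySem.Str.lower search_query)
            (PySem.Str.lower (PySem.Dict.getD (PySem.Dict.ofList chat) "answer" "")))
      else history;
     if filter_language ≠ "All" then
        f1.filter (fun chat =>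
          PySem.Dict.getD (PySem.Dict.ofList chat) "language" "" == filter_language)
      else f1)
    = history.filter (fun chat =>
        decide (¬ (search_query ≠ "" ∧
          ¬ PySem.Str.isIn (PySem.Str.lower search_query)
              (PySem.Str.lower (PySem.Dict.getD (PySem.Dict.ofList chat) "query" "")) ∧
          ¬ PySem.Str.isIn (PySem.Str.lower search_query)
              (PySem.Str.lower (PySem.Dict.getD (PySem.Dict.ofList chat) "answer" "")))) &&
        decide (¬ (filter_language ≠ "All" ∧
          ¬ (PySem.Dict.getD (PySem.Dict.ofList chat) "language" "" == filter_language)))) := by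
  by_cases hs : search_query = "" <;> by_cases hl : filter_language = "All" <;>
    simp [hs, hl, List.filter_filter, Bool.and_comm, Decidable.not_not, beq_eq_decide]

-- ===== VERDICT =====
theorem filter_chat_history_spec : Claim_equal_filter_chat_history := by
  intro history search_query filter_language sort_order _ _
  unfold Spec_filter_chat_history filter_chat_history filter_chat_history_alt
  rw [foldl_skip2, ← staged_eq_combined history search_query filter_language]
  split_ifs <;>
    simp only [PySem.List.sorted_eq_foldl_insertBy, PySem.List.sorted_rev_eq_foldl_insertBy,
               foldl_append_singleton, List.nil_append]
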